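-- pv_equiv track=rewrite | github.com/gouravsalottra/paper-forge-private | agents/codec/codec.py | _extract_mismatch_items
-- ===== SOURCE A (Python) =====
-- def _extract_mismatch_items(report: str) -> list[str]:
--     lines = report.splitlines()
--     items: list[str] = []
--     current_section = ""
--     for line in lines:
--         if line.startswith("## "):
--             current_section = line.strip().lower()
--             continue
--         if not line.startswith("- "):
--             continue
--         if "## mismatched_parameters" in current_section or "## not_found_in_code" in current_section:
--             items.append(line[2:].strip())
--     return items
-- ===== SOURCE B (Python) =====
-- def _extract_mismatch_items(report: str) -> list[str]:
--     # Partition the report into (header, body-lines) sections, then collect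
--     # the "- " items from the wanted sections.
--     sections = []
--     header = ""
--     body = []
--     for line in report.splitlines():
--         if line.startswith("## "):
--             sections.append((header, body))
--             header = line.strip().lower()
--             body = []
--         else:
--             body.append(line)
--     sections.append((header, body))
--     items = []
--     for hdr, lines in sections:
--         if "## mismatched_parameters" in hdr or "## not_found_in_code" in hdr:
--             for line in lines:
--                 if line.startswith("- "):
--                     items.append(line[2:].strip())
--     return items
-- ===== Notes on version B (the rewrite author's own statement) =====
-- stated objective: alternative
-- what changed: Replaces the stateful one-pass scan that tracks the current header while emitting items with a two-phase decomposition: first partition the lines into (header, body) sections, then filter the wanted sections and collect their '- ' items.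
import Mathlib
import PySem

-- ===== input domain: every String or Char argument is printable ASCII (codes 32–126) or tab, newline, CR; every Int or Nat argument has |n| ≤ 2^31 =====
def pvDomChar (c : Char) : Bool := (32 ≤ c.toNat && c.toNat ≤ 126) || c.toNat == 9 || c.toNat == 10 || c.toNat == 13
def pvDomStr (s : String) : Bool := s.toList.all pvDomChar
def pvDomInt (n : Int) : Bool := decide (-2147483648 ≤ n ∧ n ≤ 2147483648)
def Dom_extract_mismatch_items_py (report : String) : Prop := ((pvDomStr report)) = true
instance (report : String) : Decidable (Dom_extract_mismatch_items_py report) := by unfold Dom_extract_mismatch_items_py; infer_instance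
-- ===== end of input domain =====

-- B replaces A's stateful single-pass scan by a partition-into-sections-then-filter decomposition (objective: alternative, same cost).

-- ===== PORT A =====
-- the for-loop of A: state = (current_section, items), lines processed in order
def pvAloop (ls : List String) (cur : String) (acc : List String) : List String :=
  match ls with
  | [] => acc
  | l :: rest =>
    if PySem.Str.startswith l "## " then
      pvAloop rest (PySem.Str.lower (PySem.Str.strip l)) acc
    else if !(PySem.Str.startswith l "- ") then
      pvAloop rest cur acc
    else if PySem.Str.isIn "## mismatched_parameters" cur || PySem.Str.isIn "## not_found_in_code" cur then
      pvAloop rest cur (acc ++ [PySem.Str.strip (PySem.Str.slice l (some 2) none)])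
    else
      pvAloop rest cur acc

def extract_mismatch_items_py (report : String) : List String :=
  pvAloop (PySem.Str.splitlines report) "" []

-- ===== PORT B =====
-- phase 1: partition the lines into (header, body) sections
def pvBuildSections (ls : List String) (header : String) (body : List String) :
    List (String × List String) :=
  match ls with
  | [] => [(header, body)]
  | l :: rest =>
    if PySem.Str.startswith l "## " then
      (header, body) :: pvBuildSections rest (PySem.Str.lower (PySem.Str.strip l)) []
    else
      pvBuildSections rest header (body ++ [l])

def pvWanted (h : String) : Bool :=
  PySem.Str.isIn "## mismatched_parameters" h || PySem.Str.isIn "## not_found_in_code" h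

-- phase 2: collect the "- " items of the wanted sections
def extract_mismatch_items_py_alt (report : String) : List String :=
  (pvBuildSections (PySem.Str.splitlines report) "" []).foldl
    (fun items sec =>
      if pvWanted sec.1 then
        sec.2.foldl
          (fun its l =>
            if PySem.Str.startswith l "- " then
              its ++ [PySem.Str.strip (PySem.Str.slice l (some 2) none)]
            else its) items
      else items) []

-- ===== PRECONDITION & SPEC =====
def Spec_extract_mismatch_items_py (report : String) (out : List String) : Prop := out = extract_mismatch_items_py_alt report
instance (report : String) (out : List String) : Decidable (Spec_extract_mismatch_items_py report out) := by unfold Spec_extract_mismatch_items_py; infer_instance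

-- ===== CLAIM (what is proved, stated in full; the proofs are below) =====
def Claim_equal_extract_mismatch_items_py : Prop := ∀ (report : String), Dom_extract_mismatch_items_py report → Spec_extract_mismatch_items_py report (extract_mismatch_items_py report)

-- ===== LEMMAS AND PROOFS =====

-- the items one section (h, b) contributes
def pvSecItems (h : String) (b : List String) : List String :=
  if pvWanted h then
    (b.filter (fun l => PySem.Str.startswith l "- ")).map
      (fun l => PySem.Str.strip (PySem.Str.slice l (some 2) none))
  else []

theorem pvAloop_acc (ls : List String) (cur : String) (acc : List String) :
    pvAloop ls cur acc = acc ++ pvAloop ls cur [] := by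
  induction ls generalizing cur acc with
  | nil => simp [pvAloop]
  | cons l rest ih =>
    simp only [pvAloop]
    split_ifs with h1 h2 h3
    · exact ih _ _
    · exact ih _ _
    · rw [ih _ (acc ++ _), ih _ ([] ++ _)]; simp
    · exact ih _ _

-- B's fold over the built sections, started from any accumulator, appends the flatMap of pvSecItems
theorem pvBfold_eq (secs : List (String × List String)) (acc : List String) :
    secs.foldl
      (fun items sec =>
        if pvWanted sec.1 then
          sec.2.foldl
            (fun its l =>
              if PySem.Str.startswith l "- " then
                its ++ [PySem.Str.strip (PySem.Str.slice l (some 2) none)]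
              else its) items
        else items) acc
    = acc ++ secs.flatMap (fun sec => pvSecItems sec.1 sec.2) := by
  induction secs generalizing acc with
  | nil => simp
  | cons s rest ih =>
    simp only [List.foldl_cons, List.flatMap_cons, ih, pvSecItems]
    split_ifs with h
    · rw [PySem.List.foldl_append_if]; simp
    · simp

-- key correspondence: flatMapping pvSecItems over the sections built from state (h, b)
-- equals b's pending contribution followed by A's loop from header h
theorem pvBuild_corr (ls : List String) (h : String) (b : List String) :
    (pvBuildSections ls h b).flatMap (fun sec => pvSecItems sec.1 sec.2)
      = pvSecItems h b ++ pvAloop ls h [] := by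
  induction ls generalizing h b with
  | nil => simp [pvBuildSections, pvAloop]
  | cons l rest ih =>
    simp only [pvBuildSections, pvAloop]
    split_ifs with h1 h2 h3
    · rw [List.flatMap_cons, ih]
      simp [pvSecItems]
    · -- not a header, not a "- " line: the line joins the body but contributes nothing
      rw [ih]
      simp only [Bool.not_eq_true'] at h2
      simp only [PySem.Str.startswith_eq, show "- ".toList = ['-', ' '] from rfl] at h2
      simp [pvSecItems, List.filter_append, h2]
    · -- a "- " line inside a wanted section
      rw [ih]
      have hw : pvWanted h = true := by simpa [pvWanted] using h3
      simp only [Bool.not_eq_true', Bool.not_eq_false] at h2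
      simp only [PySem.Str.startswith_eq, show "- ".toList = ['-', ' '] from rfl] at h2
      conv_rhs => rw [pvAloop_acc]
      simp [pvSecItems, List.filter_append, h2, hw]
    · -- a "- " line inside an unwanted section
      rw [ih]
      have hw : pvWanted h = false := by
        simp only [pvWanted]; simpa using h3
      simp [pvSecItems, hw]

-- ===== VERDICT (by name: the statement is the Claim_ definition above) =====
theorem extract_mismatch_items_py_spec : Claim_equal_extract_mismatch_items_py := by
  intro report _
  unfold Spec_extract_mismatch_items_py extract_mismatch_items_py extract_mismatch_items_py_alt
  rw [pvBfold_eq, pvBuild_corr]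
  simp [pvSecItems, pvWanted]
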